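-- pv_equiv track=rewrite | github.com/astrobin/astrobin | astrobin/utils.py | base26_decode
-- ===== SOURCE A (Python) =====
-- ALPHABET = "ABCDEFGHIJKLMNOPQRSTUVWXYZ"
--
-- def base26_decode(string, alphabet=ALPHABET):
--     """Decode a Base X encoded string into the number
--
--     Arguments:
--     - `string`: The encoded string
--     - `alphabet`: The alphabet to use for encoding
--     """
--     base = len(alphabet)
--     strlen = len(string)
--     num = 0
--
--     idx = 0
--     for char in string:
--         power = (strlen - (idx + 1))
--         num += alphabet.index(char) * (base ** power)
--         idx += 1
--
--     return num
-- ===== SOURCE B (Python) =====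
-- ALPHABET = "ABCDEFGHIJKLMNOPQRSTUVWXYZ"
--
-- def base26_decode(string, alphabet=ALPHABET):
--     """Decode a Base X encoded string into the number (Horner's method, dict index)."""
--     index = {}
--     for i, char in enumerate(alphabet):
--         index.setdefault(char, i)
--     num = 0
--     for char in string:
--         num = num * len(alphabet) + index[char]
--     return num
-- ===== Notes on version B (the rewrite author's own statement) =====
-- stated objective: faster
-- what changed: Replaces the per-character alphabet.index scan and base**power exponentiation with a dict of first-occurrence indices built once and a single Horner-style pass (num = num*base + digit).
import Mathlib
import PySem

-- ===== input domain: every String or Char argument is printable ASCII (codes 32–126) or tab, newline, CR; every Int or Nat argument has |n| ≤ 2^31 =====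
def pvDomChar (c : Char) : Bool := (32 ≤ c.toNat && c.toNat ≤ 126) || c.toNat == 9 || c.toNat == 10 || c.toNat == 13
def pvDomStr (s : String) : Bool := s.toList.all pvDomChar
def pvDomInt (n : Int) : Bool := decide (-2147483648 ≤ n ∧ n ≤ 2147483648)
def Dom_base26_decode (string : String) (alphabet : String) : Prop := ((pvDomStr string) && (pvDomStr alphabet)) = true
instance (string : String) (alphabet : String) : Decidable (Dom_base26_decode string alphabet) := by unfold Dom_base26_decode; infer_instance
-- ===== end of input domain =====

-- B replaces A's per-character alphabet.index scan and base**power exponentiation with a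
-- dict of first-occurrence indices built once plus a single Horner pass (objective: faster).


-- ===== PORT A =====
-- alphabet.index(char) raises on a missing char (excluded by Pre_); the port totalizes it with -1.
def base26_decode (string : String) (alphabet : String) : Int :=
  let base : Int := PySem.Str.len alphabet
  let strlen : Int := PySem.Str.len string
  let r :=
    string.toList.foldl
      (fun (p : Int × Int) char =>
        let power : Int := strlen - (p.2 + 1)
        (p.1 + ((PySem.List.index? alphabet.toList char).map (fun (k : Nat) => (k : Int))).getD (-1)
               * base ^ power.toNat,
         p.2 + 1))
      (0, 0)
  r.1

-- ===== PORT B =====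
-- index[char] raises KeyError on a missing char (excluded by Pre_); the port totalizes it with -1.
def base26_decode_alt (string : String) (alphabet : String) : Int :=
  let index : PySem.Dict Char Int :=
    (PySem.List.enumerate alphabet.toList).foldl
      (fun d p => d.setdefault p.2 p.1) PySem.Dict.empty
  let base : Int := PySem.Str.len alphabet
  string.toList.foldl (fun num char => num * base + (index.get? char).getD (-1)) 0

-- ===== PRECONDITION & SPEC =====
-- Pre_ excludes inputs where some character of `string` is not in `alphabet`: there both
-- Pythons raise (A a ValueError from str.index, B a KeyError).
def Pre_base26_decode (string : String) (alphabet : String) : Prop :=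
  string.toList.all (fun c => alphabet.toList.contains c) = true
instance (string : String) (alphabet : String) : Decidable (Pre_base26_decode string alphabet) := by
  unfold Pre_base26_decode; infer_instance

def pvWitness_base26_decode : String × String := ("CBA", "ABCDEFGHIJKLMNOPQRSTUVWXYZ")

def Spec_base26_decode (string : String) (alphabet : String) (out : Int) : Prop := out = base26_decode_alt string alphabet
instance (string : String) (alphabet : String) (out : Int) : Decidable (Spec_base26_decode string alphabet out) := by unfold Spec_base26_decode; infer_instance

-- ===== CLAIM (what is proved, stated in full; the proofs are below) =====
def Claim_equal_base26_decode : Prop := ∀ (string : String) (alphabet : String), Dom_base26_decode string alphabet → Pre_base26_decode string alphabet → Spec_base26_decode string alphabet (base26_decode string alphabet)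

-- ===== LEMMAS AND PROOFS =====

-- The setdefault-loop dict maps every char to its FIRST index in the alphabet (shifted by the start s).
theorem dict_get?_eq_index? (al : List Char) :
    ∀ (s : Int) (d : PySem.Dict Char Int) (c : Char),
      ((PySem.List.enumerate al s).foldl (fun d p => d.setdefault p.2 p.1) d).get? c
        = if d.contains c then d.get? c
          else (PySem.List.index? al c).map (fun (k : Nat) => s + (k : Int)) := by
  induction al with
  | nil =>
      intro s d c
      simp only [PySem.List.enumerate_nil, List.foldl_nil, PySem.List.index?_eq_idxOf?,
        List.idxOf?_nil]
      split_ifs with h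
      · rfl
      · exact (PySem.Dict.get?_eq_none_iff_contains d c).mpr (by simpa using h)
  | cons a al ih =>
      intro s d c
      rw [PySem.List.enumerate_cons, List.foldl_cons, ih]
      by_cases hca : c = a
      · subst hca
        have hct : (d.setdefault c s).contains c = true := by
          rw [PySem.Dict.contains_setdefault]; simp
        rw [if_pos hct, PySem.Dict.get?_setdefault_self, PySem.List.index?_cons_self]
        by_cases hd : d.contains c = true
        · rw [if_pos hd]
          have hs : (d.get? c).isSome := by
            rw [← PySem.Dict.contains_eq_isSome_get?]; exact hd
          rcases Option.isSome_iff_exists.mp hs with ⟨v, hv⟩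
          rw [hv]; rfl
        · rw [if_neg hd]
          have h0 : d.get? c = none :=
            (PySem.Dict.get?_eq_none_iff_contains d c).mpr (by simpa using hd)
          simp [h0]
      · have hne : a ≠ c := fun h => hca h.symm
        have hcf : (d.setdefault a s).contains c = d.contains c := by
          rw [PySem.Dict.contains_setdefault]; simp [hca]
        rw [PySem.Dict.get?_setdefault_of_ne d s hca, hcf,
          PySem.List.index?_cons_of_ne al hne]
        split_ifs with hd
        · rfl
        · cases PySem.List.index? al c with
          | none => rfl
          | some k =>
              simp only [Option.map_some, Option.some.injEq]
              push_cast
              ring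

-- Horner fold from accumulator a = a * base^len + Horner fold from 0.
theorem horner_shift (f : Char → Int) (base : Int) :
    ∀ (cs : List Char) (a : Int),
      cs.foldl (fun n ch => n * base + f ch) a
        = a * base ^ cs.length + cs.foldl (fun n ch => n * base + f ch) 0 := by
  intro cs
  induction cs with
  | nil => intro a; simp
  | cons c cs ih =>
      intro a
      simp only [List.foldl_cons, List.length_cons]
      rw [ih (a * base + f c), ih (0 * base + f c)]
      ring

-- A's positional-weight accumulation equals B's Horner pass, for any digit function f.
theorem sum_powers_eq_horner (f : Char → Int) (base : Int) :
    ∀ (cs : List Char) (num idx strlen : Int), strlen = idx + cs.length →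
      (cs.foldl
        (fun (p : Int × Int) ch =>
          (p.1 + f ch * base ^ (strlen - (p.2 + 1)).toNat, p.2 + 1)) (num, idx)).1
        = num + cs.foldl (fun n ch => n * base + f ch) 0 := by
  intro cs
  induction cs with
  | nil => intro num idx strlen h; simp
  | cons c cs ih =>
      intro num idx strlen h
      simp only [List.foldl_cons]
      rw [ih (num + f c * base ^ (strlen - (idx + 1)).toNat) (idx + 1) strlen
        (by simp at h ⊢; omega)]
      have hp : (strlen - (idx + 1)).toNat = cs.length := by
        simp only [List.length_cons] at h; omega
      rw [hp, horner_shift f base cs (0 * base + f c)]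
      ring

-- ===== VERDICT (by name: the statement is the Claim_ definition above) =====
theorem base26_decode_spec : Claim_equal_base26_decode := by
  intro string alphabet _ _
  unfold Spec_base26_decode base26_decode base26_decode_alt
  have hd : ∀ c : Char,
      (((PySem.List.enumerate alphabet.toList 0).foldl
          (fun d p => d.setdefault p.2 p.1) PySem.Dict.empty).get? c).getD (-1)
        = ((PySem.List.index? alphabet.toList c).map (fun (k : Nat) => (k : Int))).getD (-1) := by
    intro c
    rw [dict_get?_eq_index? alphabet.toList 0 PySem.Dict.empty c]
    simp [PySem.Dict.contains_empty]
  simp only [hd]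
  rw [sum_powers_eq_horner
    (fun ch => ((PySem.List.index? alphabet.toList ch).map (fun (k : Nat) => (k : Int))).getD (-1))
    (PySem.Str.len alphabet) string.toList 0 0 (PySem.Str.len string)
    (by simp [PySem.Str.len_eq])]
  simp
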